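-- pv_equiv track=rewrite | github.com/mxtdluffy/COMP9021 | assignment/ass1-Q2/superpower.py | maxPowerOneTime
-- ===== SOURCE A (Python) =====
-- import copy
--
-- def maxPowerOneTime(L, loop_times):
--     L2 = copy.copy(L)
--     L3 = []
--     for times in range(0, loop_times):
--         min_digit = min(L2)
--         L3.append(min_digit*-1)
--         L2.remove(min_digit)
--     L3 += L2
--     return sum(L3)
-- ===== SOURCE B (Python) =====
-- def maxPowerOneTime(L, loop_times):
--     k = max(loop_times, 0)
--     smallest = sorted(L)[:k]
--     return sum(L) - 2 * sum(smallest)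
-- ===== Notes on version B (the rewrite author's own statement) =====
-- stated objective: faster
-- what changed: Replaces the loop of repeated min()+list.remove() (each a linear scan) by one sort followed by 'total sum minus twice the sum of the k smallest', a closed-form over the sorted prefix.
import Mathlib
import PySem

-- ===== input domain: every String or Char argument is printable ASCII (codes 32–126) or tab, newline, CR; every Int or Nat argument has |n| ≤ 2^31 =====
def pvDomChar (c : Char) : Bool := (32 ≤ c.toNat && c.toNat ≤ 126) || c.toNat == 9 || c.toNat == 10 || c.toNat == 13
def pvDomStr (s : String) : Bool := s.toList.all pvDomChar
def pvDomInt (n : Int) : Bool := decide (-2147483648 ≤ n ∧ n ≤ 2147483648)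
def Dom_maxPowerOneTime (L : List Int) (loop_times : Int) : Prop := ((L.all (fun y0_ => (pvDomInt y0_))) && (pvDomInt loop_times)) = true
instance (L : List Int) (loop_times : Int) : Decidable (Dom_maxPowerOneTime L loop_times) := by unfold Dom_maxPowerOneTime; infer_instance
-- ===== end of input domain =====

-- B replaces A's repeated min+remove loop by one sort and the closed form
-- sum(L) - 2*sum(k smallest); equivalence proved for loop_times ≤ len(L) (else A raises).


-- ===== PORT A =====
-- one loop iteration: take the min of L2, append its negation to L3, remove it from L2
-- (on the empty L2 — excluded by Pre_ — Python's min raises; the port keeps the state)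
def pvStepA (st : List Int × List Int) : List Int × List Int :=
  match PySem.List.min? st.1 (fun x => x) with
  | none => st
  | some m => ((PySem.List.remove? st.1 m).getD st.1, st.2 ++ [m * -1])

def maxPowerOneTime (L : List Int) (loop_times : Int) : Int :=
  let st := (PySem.List.pyRange 0 loop_times 1).foldl (fun s _ => pvStepA s) (L, ([] : List Int))
  ((st.2 ++ st.1).sum)

-- ===== PORT B =====
def maxPowerOneTime_alt (L : List Int) (loop_times : Int) : Int :=
  let k := max loop_times 0
  let smallest := PySem.List.slice (PySem.List.sorted L (fun x => x) false) none (some k)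
  L.sum - 2 * smallest.sum

-- ===== PRECONDITION & SPEC =====
-- Pre_ excludes loop_times > len(L): there A's 'min(L2)' hits an empty list and raises ValueError.
def Pre_maxPowerOneTime (L : List Int) (loop_times : Int) : Prop := loop_times ≤ (L.length : Int)
instance (L : List Int) (loop_times : Int) : Decidable (Pre_maxPowerOneTime L loop_times) := by unfold Pre_maxPowerOneTime; infer_instance
def pvWitness_maxPowerOneTime : List Int × Int := ([3, -1, 2], 2)

def Spec_maxPowerOneTime (L : List Int) (loop_times : Int) (out : Int) : Prop := out = maxPowerOneTime_alt L loop_times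
instance (L : List Int) (loop_times : Int) (out : Int) : Decidable (Spec_maxPowerOneTime L loop_times out) := by unfold Spec_maxPowerOneTime; infer_instance

-- ===== CLAIM (what is proved, stated in full; the proofs are below) =====
def Claim_equal_maxPowerOneTime : Prop := ∀ (L : List Int) (loop_times : Int), Dom_maxPowerOneTime L loop_times → Pre_maxPowerOneTime L loop_times → Spec_maxPowerOneTime L loop_times (maxPowerOneTime L loop_times)

-- ===== LEMMAS AND PROOFS =====

-- a foldl whose step ignores the list element is an iterate
lemma foldl_const_iterate {α σ : Type} (l : List α) (g : σ → σ) (init : σ) :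
    l.foldl (fun s _ => g s) init = g^[l.length] init := by
  induction l generalizing init with
  | nil => rfl
  | cons x t ih => simp [List.foldl_cons, ih, Function.iterate_succ_apply]

-- the first minimum heads the sort, the rest is the sort of the erase
lemma sorted_cons_erase (xs : List Int) (m : Int)
    (hm : PySem.List.min? xs (fun x => x) = some m) :
    PySem.List.sorted xs (fun x => x) false
      = m :: PySem.List.sorted (xs.erase m) (fun x => x) false := by
  have hmem : m ∈ xs := PySem.List.min?_mem hm
  have hmin : ∀ y ∈ xs, m ≤ y := by
    intro y hy; exact PySem.List.min?_isMin hm y hy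
  refine PySem.List.sorted_id_eq_of_perm_of_pairwise _ _ ?_ ?_
  · exact ((PySem.List.sorted_perm (xs.erase m) (fun x => x) false).cons m).trans
      (List.perm_cons_erase hmem).symm
  · refine List.Pairwise.cons ?_ (PySem.List.sorted_pairwise (xs.erase m) (fun x => x))
    intro y hy
    have : y ∈ xs.erase m := (PySem.List.mem_sorted (xs.erase m) (fun x => x) false y).mp hy
    exact hmin y (List.mem_of_mem_erase this)

lemma iterA_sum (n : Nat) : ∀ (xs acc : List Int), n ≤ xs.length →
    (((pvStepA^[n]) (xs, acc)).2 ++ ((pvStepA^[n]) (xs, acc)).1).sum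
      = acc.sum + xs.sum
        - 2 * ((PySem.List.sorted xs (fun x => x) false).take n).sum := by
  induction n with
  | zero => intro xs acc _; simp
  | succ n ih =>
    intro xs acc h
    have hne : xs ≠ [] := by
      intro hx; subst hx; simp at h
    obtain ⟨m, hm⟩ : ∃ m, PySem.List.min? xs (fun x => x) = some m := by
      cases hmm : PySem.List.min? xs (fun x => x) with
      | none => exact absurd ((PySem.List.min?_eq_none_iff xs (fun x => x)).mp hmm) hne
      | some m => exact ⟨m, rfl⟩
    have hmem : m ∈ xs := PySem.List.min?_mem hm
    have hstep : pvStepA (xs, acc) = (xs.erase m, acc ++ [m * -1]) := by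
      simp [pvStepA, hm, PySem.List.remove?_eq_some_erase xs m hmem]
    have hlen : n ≤ (xs.erase m).length := by
      have := List.length_erase_of_mem hmem
      omega
    have hperm : xs.Perm (m :: xs.erase m) := List.perm_cons_erase hmem
    have hsum : xs.sum = m + (xs.erase m).sum := by
      simpa using hperm.sum_eq
    rw [Function.iterate_succ_apply, hstep, ih _ _ hlen,
        sorted_cons_erase xs m hm]
    simp [List.take_succ_cons]
    rw [hsum]
    ring

lemma pyRange_len (k : Int) : (PySem.List.pyRange 0 k 1).length = k.toNat := by
  simp [PySem.List.length_pyRange_one]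

theorem maxPowerOneTime_spec : Claim_equal_maxPowerOneTime := by
  intro L k _ hpre
  unfold Spec_maxPowerOneTime maxPowerOneTime maxPowerOneTime_alt
  simp only []
  rw [foldl_const_iterate, pyRange_len]
  by_cases hk : 0 ≤ k
  · have hlen : k.toNat ≤ L.length := by
      unfold Pre_maxPowerOneTime at hpre; omega
    rw [iterA_sum k.toNat L [] hlen]
    have hmax : max k 0 = k := by omega
    rw [hmax, PySem.List.slice_to _ hk]
    simp
  · have h0 : k.toNat = 0 := by omega
    have hmax : max k 0 = (0 : Int) := by omega
    rw [h0, hmax, PySem.List.slice_to _ (by norm_num : (0:Int) ≤ 0)]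
    simp
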